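-- pv_equiv track=rewrite | github.com/Github-Aiko/Learing-python | toan-nang-cao/th6/baitap.py | Expression
-- ===== SOURCE A (Python) =====
-- def Expression(nums):
--     n = len(nums)
--     T = sum(nums)
--     max_sum = T // 2
--     L = [0] * (max_sum + 1)
--     L[0] = 1
--     for i in range(n):
--         for j in range(max_sum, nums[i] - 1, -1):
--             L[j] |= L[j - nums[i]]
--     max_product = 0
--     for S in range(max_sum, 0, -1):
--         if L[S]:
--             max_product = S * (T - S)
--             break
--     return max_product
-- ===== SOURCE B (Python) =====
-- def Expression(nums):
--     T = sum(nums)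
--     cap = T // 2
--     # sorted list of the distinct reachable subset sums that are <= cap
--     sums = [0]
--     for num in nums:
--         shifted = [s + num for s in sums if s + num <= cap]
--         merged = []
--         i = j = 0
--         while i < len(sums) and j < len(shifted):
--             a, b = sums[i], shifted[j]
--             if a < b:
--                 merged.append(a); i += 1
--             elif b < a:
--                 merged.append(b); j += 1
--             else:
--                 merged.append(a); i += 1; j += 1
--         merged.extend(sums[i:])
--         merged.extend(shifted[j:])
--         sums = merged
--     S = sums[-1]
--     return S * (T - S)
-- ===== Notes on version B (the rewrite author's own statement) =====
-- stated objective: alternative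
-- what changed: Instead of A's boolean DP table over all indices 0..T//2 (reverse inner loop per element, then a downward scan for the first reachable sum), B maintains the sorted list of the distinct reachable subset sums that stay <= T//2, extending it per element by a sorted merge with its shifted copy, and reads the answer off as the list's last element; the work is proportional to the number of reachable sums rather than to T//2 per element, but no speedup is claimed. …
import Mathlib
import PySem

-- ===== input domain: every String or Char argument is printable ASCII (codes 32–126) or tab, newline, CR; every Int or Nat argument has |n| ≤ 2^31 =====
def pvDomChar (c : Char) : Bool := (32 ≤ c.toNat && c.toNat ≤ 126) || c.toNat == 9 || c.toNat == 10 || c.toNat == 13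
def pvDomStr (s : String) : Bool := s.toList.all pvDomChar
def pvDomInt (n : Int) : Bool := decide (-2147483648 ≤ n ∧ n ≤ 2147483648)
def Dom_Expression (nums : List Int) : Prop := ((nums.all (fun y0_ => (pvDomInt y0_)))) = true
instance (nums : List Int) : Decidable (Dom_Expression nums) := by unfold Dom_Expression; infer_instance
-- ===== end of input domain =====

-- B generates the sorted list of distinct reachable subset sums (≤ T//2) by merging,
-- instead of A's boolean DP table with a reverse inner loop and a final scan; return-value
-- equivalence is proved on lists of nonnegative integers (elsewhere A raises).


-- ===== PORT A =====
-- inner loop: for j in range(max_sum, num-1, -1): L[j] |= L[j-num]   (j descending)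
def exprInnerA (num : Int) (L : List Int) (j : Nat) : List Int :=
  if (j : Int) < num then L
  else
    let L' := L.set j (Int.lor (L.getD j 0) (L.getD (j - num.toNat) 0))
    match j with
    | 0 => L'
    | j' + 1 => exprInnerA num L' j'

-- final loop: for S in range(max_sum, 0, -1): if L[S]: return S*(T-S)
def exprScanA (L : List Int) (T : Int) : Nat → Int
  | 0 => 0
  | S + 1 => if L.getD (S + 1) 0 ≠ 0 then ((S : Int) + 1) * (T - ((S : Int) + 1)) else exprScanA L T S

def Expression (nums : List Int) : Int :=
  let T : Int := nums.sum
  let maxSum : Int := PySem.Int.floordiv T 2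
  let L0 : List Int := (List.replicate (maxSum + 1).toNat 0).set 0 1
  let L : List Int := nums.foldl (fun L num => exprInnerA num L maxSum.toNat) L0
  exprScanA L T maxSum.toNat

-- ===== PORT B =====
-- the index-based 'while i < len(sums) and j < len(shifted)' merge plus the two extends,
-- written as the obvious recursion on the two unconsumed suffixes
def exprMergeB : List Int → List Int → List Int
  | [], ys => ys
  | x :: xs, [] => x :: xs
  | a :: xs, b :: ys =>
    if a < b then a :: exprMergeB xs (b :: ys)
    else if b < a then b :: exprMergeB (a :: xs) ys
    else a :: exprMergeB xs ys
termination_by xs ys => xs.length + ys.length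

-- one loop body: shifted = [s+num for s in sums if s+num <= cap]; sums = merge(sums, shifted)
def exprStepB (cap : Int) (sums : List Int) (num : Int) : List Int :=
  exprMergeB sums ((sums.filter (fun s => decide (s + num ≤ cap))).map (fun s => s + num))

def Expression_alt (nums : List Int) : Int :=
  let T : Int := nums.sum
  let cap : Int := PySem.Int.floordiv T 2
  let sums : List Int := nums.foldl (exprStepB cap) [0]
  -- sums[-1]; sums is never empty (it always contains 0), the default is a totality guard
  let S : Int := sums.getLast?.getD 0
  S * (T - S)

-- ===== PRECONDITION & SPEC =====
-- Pre_ excludes exactly the lists with a negative element: on every such list A raises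
-- IndexError (empty table when the total is negative, otherwise the first inner-loop
-- access L[max_sum - num] lies past the end of the table), so A returns on no excluded input.
def Pre_Expression (nums : List Int) : Prop := ∀ x ∈ nums, 0 ≤ x
instance (nums : List Int) : Decidable (Pre_Expression nums) := by unfold Pre_Expression; infer_instance
def pvWitness_Expression : List Int := [3, 1, 4, 2]


def Spec_Expression (nums : List Int) (out : Int) : Prop := out = Expression_alt nums
instance (nums : List Int) (out : Int) : Decidable (Spec_Expression nums out) := by unfold Spec_Expression; infer_instance

-- ===== CLAIM (what is proved, stated in full; the proofs are below) =====
def Claim_equal_Expression : Prop := ∀ (nums : List Int), Dom_Expression nums → Pre_Expression nums → Spec_Expression nums (Expression nums)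

-- ===== LEMMAS AND PROOFS =====

theorem length_exprInnerA (num : Int) (L : List Int) (j : Nat) :
    (exprInnerA num L j).length = L.length := by
  induction j generalizing L with
  | zero => unfold exprInnerA; split <;> simp
  | succ j ih => unfold exprInnerA; split <;> simp [ih]

theorem getD_exprInnerA (num : Int) (L : List Int) (j k : Nat) :
    (exprInnerA num L j).getD k 0 =
      if num ≤ (k : Int) ∧ k ≤ j ∧ k < L.length
      then Int.lor (L.getD k 0) (L.getD (k - num.toNat) 0)
      else L.getD k 0 := by
  induction j generalizing L with
  | zero =>
    unfold exprInnerA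
    split
    · split
      · omega
      · rfl
    · rename_i hge
      by_cases hk : k = 0
      · subst hk
        by_cases hlen : 0 < L.length
        · have h0 : num ≤ (0 : Int) := by omega
          rw [if_pos ⟨h0, Nat.le_refl 0, hlen⟩]
          simp only [List.getD]
          rw [List.getElem?_set_self hlen]
          rfl
        · have : L = [] := by cases L <;> simp_all
          subst this; simp
      · simp only [List.getD]
        rw [List.getElem?_set_ne (by omega)]
        rw [if_neg (by omega)]
  | succ j ih =>
    unfold exprInnerA
    split
    · rename_i hlt
      rw [if_neg (by omega)]
    · rename_i hge
      rw [ih]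
      have hlen : (L.set (j+1) (Int.lor (L.getD (j+1) 0) (L.getD (j+1 - num.toNat) 0))).length = L.length := by simp
      by_cases hkj : k ≤ j
      · have h1 : (L.set (j+1) (Int.lor (L.getD (j+1) 0) (L.getD (j+1 - num.toNat) 0))).getD k 0 = L.getD k 0 := by
          simp only [List.getD]; rw [List.getElem?_set_ne (by omega)]
        have h2 : (L.set (j+1) (Int.lor (L.getD (j+1) 0) (L.getD (j+1 - num.toNat) 0))).getD (k - num.toNat) 0 = L.getD (k - num.toNat) 0 := by
          simp only [List.getD]; rw [List.getElem?_set_ne (by omega)]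
        rw [hlen, h1, h2]
        by_cases hc : num ≤ (k : Int) ∧ k < L.length
        · rw [if_pos ⟨hc.1, hkj, hc.2⟩, if_pos ⟨hc.1, by omega, hc.2⟩]
        · rw [if_neg (by tauto), if_neg (by tauto)]
      · rw [if_neg (by omega)]
        by_cases hk1 : k = j + 1
        · subst hk1
          by_cases hlt : j + 1 < L.length
          · rw [if_pos ⟨by omega, by omega, hlt⟩]
            simp only [List.getD]
            rw [List.getElem?_set_self hlt]
            rfl
          · rw [if_neg (by omega)]
            simp only [List.getD]
            rw [List.getElem?_eq_none (by simp; omega), List.getElem?_eq_none (by omega)]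
        · simp only [List.getD]
          rw [List.getElem?_set_ne (by omega)]
          rw [if_neg (by omega)]

-- membership in the merge is the union of memberships
theorem mem_exprMergeB (xs ys : List Int) (s : Int) :
    s ∈ exprMergeB xs ys ↔ s ∈ xs ∨ s ∈ ys := by
  induction xs, ys using exprMergeB.induct with
  | case1 ys => simp [exprMergeB]
  | case2 x xs => simp [exprMergeB]
  | case3 a xs b ys hab ih =>
    rw [exprMergeB, if_pos hab]
    simp [ih]; tauto
  | case4 a xs b ys hab hba ih =>
    rw [exprMergeB, if_neg hab, if_pos hba]
    simp [ih]; tauto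
  | case5 a xs b ys hab hba ih =>
    rw [exprMergeB, if_neg hab, if_neg hba]
    have hEq : a = b := by omega
    subst hEq
    simp [ih]; tauto

-- merging two strictly increasing lists yields a strictly increasing list
theorem pairwise_exprMergeB (xs ys : List Int)
    (hx : xs.Pairwise (· < ·)) (hy : ys.Pairwise (· < ·)) :
    (exprMergeB xs ys).Pairwise (· < ·) := by
  induction xs, ys using exprMergeB.induct with
  | case1 ys => simpa [exprMergeB]
  | case2 x xs => simpa [exprMergeB] using hx
  | case3 a xs b ys hab ih =>
    rw [exprMergeB, if_pos hab]
    rw [List.pairwise_cons] at hx ⊢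
    refine ⟨?_, ih hx.2 hy⟩
    intro z hz
    rcases (mem_exprMergeB _ _ _).1 hz with h | h
    · exact hx.1 z h
    · rcases List.mem_cons.1 h with rfl | h
      · exact hab
      · exact lt_trans hab ((List.pairwise_cons.1 hy).1 z h)
  | case4 a xs b ys hab hba ih =>
    rw [exprMergeB, if_neg hab, if_pos hba]
    rw [List.pairwise_cons] at hy ⊢
    refine ⟨?_, ih hx hy.2⟩
    intro z hz
    rcases (mem_exprMergeB _ _ _).1 hz with h | h
    · rcases List.mem_cons.1 h with rfl | h
      · exact hba
      · exact lt_trans hba ((List.pairwise_cons.1 hx).1 z h)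
    · exact hy.1 z h
  | case5 a xs b ys hab hba ih =>
    rw [exprMergeB, if_neg hab, if_neg hba]
    have hEq : a = b := by omega
    subst hEq
    rw [List.pairwise_cons] at hx hy ⊢
    refine ⟨?_, ih hx.2 hy.2⟩
    intro z hz
    rcases (mem_exprMergeB _ _ _).1 hz with h | h
    · exact hx.1 z h
    · exact hy.1 z h

-- the last element of a strictly increasing list bounds all its elements
theorem le_getLast_of_pairwise (l : List Int) (h : l.Pairwise (· < ·)) (x : Int)
    (hx : x ∈ l) (hne : l ≠ []) : x ≤ l.getLast hne := by
  induction l with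
  | nil => cases hx
  | cons a l ih =>
    rw [List.pairwise_cons] at h
    cases l with
    | nil => simp at hx; simp [hx, List.getLast]
    | cons b l' =>
      rw [List.getLast_cons (by simp)]
      rcases List.mem_cons.1 hx with rfl | hx'
      · exact le_of_lt (h.1 _ (List.getLast_mem _))
      · exact ih h.2 hx' (by simp)

-- the three invariants carried through the fold: R is the set of processed subset sums
def TblInv (ms : Nat) (R : Int → Prop) (L : List Int) : Prop :=
  L.length = ms + 1 ∧ (∀ k : Nat, L.getD k 0 = 0 ∨ L.getD k 0 = 1) ∧
  (∀ k : Nat, k ≤ ms → (L.getD k 0 = 1 ↔ R k))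

def SumInv (cap : Int) (R : Int → Prop) (sums : List Int) : Prop :=
  sums.Pairwise (· < ·) ∧ ∀ s : Int, s ∈ sums ↔ (R s ∧ s ≤ cap)

def RGood (R : Int → Prop) : Prop := R 0 ∧ ∀ s, R s → 0 ≤ s

theorem lor01 (a b : Int) (ha : a = 0 ∨ a = 1) (hb : b = 0 ∨ b = 1) :
    Int.lor a b = if a = 1 ∨ b = 1 then 1 else 0 := by
  rcases ha with rfl | rfl <;> rcases hb with rfl | rfl <;> simp <;> decide

theorem tblInv_step (ms : Nat) (R : Int → Prop) (L : List Int) (num : Int)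
    (hnum : 0 ≤ num) (hR : ∀ s, R s → 0 ≤ s) (h : TblInv ms R L) :
    TblInv ms (fun s => R s ∨ R (s - num)) (exprInnerA num L ms) := by
  obtain ⟨hlen, h01, hbit⟩ := h
  have hset : ∀ k : Nat, (exprInnerA num L ms).getD k 0 =
      if num ≤ (k : Int) ∧ k ≤ ms ∧ k < L.length
      then Int.lor (L.getD k 0) (L.getD (k - num.toNat) 0)
      else L.getD k 0 := fun k => getD_exprInnerA num L ms k
  refine ⟨by rw [length_exprInnerA, hlen], ?_, ?_⟩
  · intro k
    rw [hset k]
    split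
    · rw [lor01 _ _ (h01 k) (h01 (k - num.toNat))]
      split <;> simp
    · exact h01 k
  · intro k hk
    rw [hset k]
    by_cases hc : num ≤ (k : Int)
    · rw [if_pos ⟨hc, hk, by omega⟩]
      rw [lor01 _ _ (h01 k) (h01 (k - num.toNat))]
      have hkn : k - num.toNat ≤ ms := by omega
      have hcast : ((k - num.toNat : Nat) : Int) = (k : Int) - num := by omega
      by_cases hif : L.getD k 0 = 1 ∨ L.getD (k - num.toNat) 0 = 1
      · rw [if_pos hif]
        constructor
        · intro _
          rcases hif with h | h
          · exact Or.inl ((hbit k hk).1 h)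
          · exact Or.inr (hcast ▸ (hbit _ hkn).1 h)
        · intro _; rfl
      · rw [if_neg hif]
        constructor
        · intro h; exact absurd h (by norm_num)
        · rintro (h | h)
          · exact absurd ((hbit k hk).2 h) (fun hh => hif (Or.inl hh))
          · exact absurd ((hbit _ hkn).2 (by rw [hcast]; exact h)) (fun hh => hif (Or.inr hh))
    · rw [if_neg (by tauto), hbit k hk]
      have hneg : ¬ R ((k : Int) - num) := fun hh => by
        have := hR _ hh; omega
      tauto

theorem sumInv_step (cap : Int) (R : Int → Prop) (sums : List Int) (num : Int)
    (hnum : 0 ≤ num) (h : SumInv cap R sums) :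
    SumInv cap (fun s => R s ∨ R (s - num)) (exprStepB cap sums num) := by
  obtain ⟨hsort, hmem⟩ := h
  have hshift : ∀ s : Int,
      s ∈ (sums.filter (fun s => decide (s + num ≤ cap))).map (fun s => s + num) ↔
      (R (s - num) ∧ s ≤ cap) := by
    intro s
    simp only [List.mem_map, List.mem_filter, decide_eq_true_eq]
    constructor
    · rintro ⟨t, ⟨ht, htc⟩, rfl⟩
      have := (hmem t).1 ht
      exact ⟨by simpa using this.1, htc⟩
    · rintro ⟨hr, hc⟩
      exact ⟨s - num, ⟨(hmem _).2 ⟨hr, by omega⟩, by omega⟩, by omega⟩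
  have hsortS : ((sums.filter (fun s => decide (s + num ≤ cap))).map (fun s => s + num)).Pairwise (· < ·) := by
    refine List.Pairwise.map _ (fun a b hab => by omega) (List.Pairwise.filter _ hsort)
  unfold exprStepB
  constructor
  · exact pairwise_exprMergeB _ _ hsort hsortS
  · intro s
    rw [mem_exprMergeB, hmem, hshift]
    constructor
    · rintro (⟨hr, hc⟩ | ⟨hr, hc⟩) <;> exact ⟨by tauto, hc⟩
    · rintro ⟨hr | hr, hc⟩
      · exact Or.inl ⟨hr, hc⟩
      · exact Or.inr ⟨hr, hc⟩

theorem rgood_step (R : Int → Prop) (num : Int) (hnum : 0 ≤ num) (h : RGood R) :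
    RGood (fun s => R s ∨ R (s - num)) := by
  refine ⟨Or.inl h.1, ?_⟩
  rintro s (hs | hs)
  · exact h.2 s hs
  · have := h.2 _ hs; omega

theorem fold_inv (ms : Nat) (cap : Int) (l : List Int) :
    ∀ (R : Int → Prop) (L sums : List Int),
    (∀ x ∈ l, 0 ≤ x) → TblInv ms R L → SumInv cap R sums → RGood R →
    ∃ R' : Int → Prop,
      TblInv ms R' (l.foldl (fun L num => exprInnerA num L ms) L) ∧
      SumInv cap R' (l.foldl (exprStepB cap) sums) ∧ RGood R' := by
  induction l with
  | nil => exact fun R L sums _ h1 h2 h3 => ⟨R, h1, h2, h3⟩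
  | cons x xs ih =>
    intro R L sums hpre h1 h2 h3
    have hx : 0 ≤ x := hpre x (by simp)
    simp only [List.foldl_cons]
    exact ih _ _ _ (fun y hy => hpre y (by simp [hy]))
      (tblInv_step ms R L x hx h3.2 h1)
      (sumInv_step cap R sums x hx h2)
      (rgood_step R x hx h3)

theorem tblInv_init (ms : Nat) :
    TblInv ms (fun s => s = 0) ((List.replicate (ms + 1) 0).set 0 1) := by
  refine ⟨by simp, ?_, ?_⟩
  · intro k
    cases k with
    | zero => right; simp [List.getD]
    | succ k =>
      left
      simp only [List.getD]
      rw [List.getElem?_set_ne (by omega), List.getElem?_replicate]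
      by_cases h : k + 1 < ms + 1 <;> simp [h]
  · intro k hk
    cases k with
    | zero => simp [List.getD]
    | succ k =>
      simp only [List.getD]
      rw [List.getElem?_set_ne (by omega), List.getElem?_replicate]
      have : k + 1 < ms + 1 := by omega
      simp [this]
      omega

theorem sumInv_init (cap : Int) (hcap : 0 ≤ cap) :
    SumInv cap (fun s => s = 0) [0] := by
  refine ⟨by simp, ?_⟩
  intro s
  simp only [List.mem_singleton]
  constructor
  · rintro rfl; exact ⟨rfl, hcap⟩
  · rintro ⟨rfl, _⟩; rfl

-- the scan returns Sb*(T-Sb) where Sb is the greatest reachable value ≤ the scan start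
theorem scan_eq (ms : Nat) (R : Int → Prop) (L : List Int) (T Sb : Int)
    (h : TblInv ms R L) (hSbR : R Sb) (hSb0 : 0 ≤ Sb)
    (hmax : ∀ k : Nat, k ≤ ms → R k → (k : Int) ≤ Sb) :
    ∀ S : Nat, S ≤ ms → Sb ≤ (S : Int) → exprScanA L T S = Sb * (T - Sb) := by
  intro S
  induction S with
  | zero =>
    intro _ hle
    have : Sb = 0 := le_antisymm (by exact_mod_cast hle) hSb0
    subst this
    simp [exprScanA]
  | succ S ih =>
    intro hms hle
    unfold exprScanA
    have h01 := h.2.1 (S + 1)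
    by_cases hb : L.getD (S + 1) 0 = 1
    · have hr : R ((S : Int) + 1) := by
        have := (h.2.2 (S + 1) hms).1 hb
        simpa using this
      have h1 : ((S + 1 : Nat) : Int) ≤ Sb := hmax (S + 1) hms hr
      have : Sb = (S : Int) + 1 := by push_cast at h1; omega
      subst this
      rw [if_pos (by omega)]
    · have hz : L.getD (S + 1) 0 = 0 := by tauto
      rw [hz, if_neg (by simp)]
      have hr : ¬ R ((S : Int) + 1) := fun hc => by
        have := (h.2.2 (S + 1) hms).2 (by simpa using hc)
        exact hb this
      have : Sb ≤ (S : Int) := by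
        by_contra hcon
        have : Sb = (S : Int) + 1 := by omega
        exact hr (this ▸ hSbR)
      exact ih (by omega) this

-- ===== VERDICT (by name: the statement is the Claim_ definition above) =====
theorem Expression_spec : Claim_equal_Expression := by
  intro nums _ hpre
  unfold Spec_Expression Expression Expression_alt
  have hT : (0 : Int) ≤ nums.sum := List.sum_nonneg hpre
  have hcap : (0 : Int) ≤ PySem.Int.floordiv nums.sum 2 := by
    rw [PySem.Int.floordiv_eq_ediv_of_pos (by omega)]
    exact Int.ediv_nonneg hT (by omega)
  set T : Int := nums.sum with hTdef
  set cap : Int := PySem.Int.floordiv T 2 with hcapdef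
  set ms : Nat := cap.toNat with hmsdef
  have hrep : (cap + 1).toNat = ms + 1 := by omega
  show exprScanA (nums.foldl (fun L num => exprInnerA num L ms)
        ((List.replicate (cap + 1).toNat 0).set 0 1)) T ms
      = (let sums := nums.foldl (exprStepB cap) [0];
         let S := sums.getLast?.getD 0; S * (T - S))
  rw [hrep]
  obtain ⟨R, hTf, hSf, hGf⟩ := fold_inv ms cap nums (fun s => s = 0)
    ((List.replicate (ms + 1) 0).set 0 1) [0] hpre
    (tblInv_init ms) (sumInv_init cap hcap) ⟨rfl, fun s hs => le_of_eq hs.symm⟩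
  set sumsF := nums.foldl (exprStepB cap) [0] with hsumsdef
  have h0mem : (0 : Int) ∈ sumsF := (hSf.2 0).2 ⟨hGf.1, hcap⟩
  have hne : sumsF ≠ [] := fun hnil => by simp [hnil] at h0mem
  have hlast : sumsF.getLast?.getD 0 = sumsF.getLast hne := by
    rw [List.getLast?_eq_some_getLast hne]; rfl
  set Sb : Int := sumsF.getLast hne with hSbdef
  have hSbmem : Sb ∈ sumsF := List.getLast_mem hne
  have hSbfacts := (hSf.2 Sb).1 hSbmem
  have hSb0 : 0 ≤ Sb := hGf.2 Sb hSbfacts.1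
  have hmax : ∀ k : Nat, k ≤ ms → R k → (k : Int) ≤ Sb := by
    intro k hk hr
    have hkcap : (k : Int) ≤ cap := by omega
    exact le_getLast_of_pairwise sumsF hSf.1 _ ((hSf.2 k).2 ⟨hr, hkcap⟩) hne
  have hscan := scan_eq ms R _ T Sb hTf hSbfacts.1 hSb0 hmax ms (le_refl ms)
    (by rw [hmsdef]; omega)
  simp only [hlast]
  exact hscan
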